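-- pv_equiv track=rewrite | github.com/sourcery-ai-experiments/jaar | src/_prime/road.py | get_forefather_roads
-- ===== SOURCE A (Python) =====
-- class RoadNode(str):
--     """A string presentation of a tree node. Nodes cannot contain RoadUnit delimiter"""
--
--     def is_node(self, delimiter: str = None) -> bool:
--         return self.find(default_road_delimiter_if_none(delimiter)) == -1
--
-- class RoadUnit(str):
--     """A string presentation of a tree path. RoadNodes are seperated by road delimiter"""
--
--     pass
--
-- def default_road_delimiter_if_none(delimiter: str = None) -> str:
--     return delimiter if delimiter != None else ","
--
-- def get_all_road_nodes(road: RoadUnit, delimiter: str = None) -> list[RoadNode]: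
--     return road.split(default_road_delimiter_if_none(delimiter))
--
-- def get_ancestor_roads(road: RoadUnit) -> list[RoadUnit:None]:
--     if road is None:
--         return []
--     nodes = get_all_road_nodes(road)
--     temp_road = nodes.pop(0)
--
--     temp_roads = [temp_road]
--     if nodes != []:
--         while nodes != []:
--             temp_road = create_road(temp_road, nodes.pop(0))
--             temp_roads.append(temp_road)
--
--     x_roads = []
--     while temp_roads != []:
--         x_roads.append(temp_roads.pop(len(temp_roads) - 1))
--     return x_roads
--
-- class ForeFatherException(Exception):
--     pass
--
-- def get_forefather_roads(road: RoadUnit) -> dict[RoadUnit]: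
--     ancestor_roads = get_ancestor_roads(road=road)
--     popped_road = ancestor_roads.pop(0)
--     if popped_road != road:
--         raise ForeFatherException(
--             f"Incorrect road {popped_road} taken out of ancestor_roads."
--         )
--     return {a_road: None for a_road in ancestor_roads}
--
-- def create_road(
--     parent_road: RoadUnit, terminus_node: RoadNode = None, delimiter: str = None
-- ) -> RoadUnit:
--     if terminus_node is None:
--         return RoadUnit(parent_road)
--     else:
--         return RoadUnit(
--             terminus_node
--             if parent_road in {"", None}
--             else f"{parent_road}{default_road_delimiter_if_none(delimiter)}{terminus_node}"
--         )
-- ===== SOURCE B (Python) =====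
-- def get_forefather_roads(road):
--     # positions of the delimiter; road[:p] is the ancestor road ending just before each one
--     cuts = [i for i, ch in enumerate(road) if ch == ","]
--     return {road[:p]: None for p in reversed(cuts)}
-- ===== Notes on version B (the rewrite author's own statement) =====
-- stated objective: simpler
-- what changed: B slices the road at each delimiter position found in one enumerate pass, instead of A's split-into-nodes, incremental re-concatenation of every prefix road, and explicit reverse-by-pop loop with a pop-and-compare check.
-- outside the precondition, e.g. on get_forefather_roads(',a'): A raises ForeFatherException, B returns {'': None}; on get_forefather_roads(','): A raises ForeFatherException, B returns {'': None}
import Mathlib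
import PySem

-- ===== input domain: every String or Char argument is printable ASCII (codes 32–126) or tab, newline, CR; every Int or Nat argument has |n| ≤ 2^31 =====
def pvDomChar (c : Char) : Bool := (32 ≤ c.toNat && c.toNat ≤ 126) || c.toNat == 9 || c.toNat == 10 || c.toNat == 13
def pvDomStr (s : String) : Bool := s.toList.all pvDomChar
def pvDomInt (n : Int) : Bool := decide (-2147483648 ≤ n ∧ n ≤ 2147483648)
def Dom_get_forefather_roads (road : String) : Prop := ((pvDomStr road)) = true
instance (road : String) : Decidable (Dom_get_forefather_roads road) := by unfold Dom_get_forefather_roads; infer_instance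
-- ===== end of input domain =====

-- B replaces A's split / incremental re-concatenation / reverse-by-pop pipeline by one
-- enumerate pass collecting delimiter positions and slicing the road at each (simpler).

-- ===== PORT A =====
-- create_road(parent_road, terminus_node) for the two-argument string case A uses
def pvCreateRoad (parent_road : List Char) (terminus_node : List Char) : List Char :=
  if parent_road = [] then terminus_node
  else parent_road ++ ',' :: terminus_node

-- the 'while nodes != []' loop of get_ancestor_roads (pop(0), create_road, append)
def pvBuildLoop : List (List Char) → List Char → List (List Char) → List (List Char)
  | [], _, temp_roads => temp_roads
  | n :: nodes, temp_road, temp_roads =>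
      pvBuildLoop nodes (pvCreateRoad temp_road n)
        (temp_roads ++ [pvCreateRoad temp_road n])

-- the 'while temp_roads != []: x_roads.append(temp_roads.pop(len-1))' loop
def pvPopRevLoop : List (List Char) → List (List Char) → List (List Char)
  | [], x_roads => x_roads
  | a :: as, x_roads =>
      pvPopRevLoop ((a :: as).dropLast) (x_roads ++ [(a :: as).getLast (by simp)])
termination_by t _ => t.length
decreasing_by simp

-- get_ancestor_roads (road is a String here, never None)
def pvGetAncestorRoads (road : List Char) : List (List Char) :=
  match PySem.Chars.splitOn road [','] with
  | [] => []                      -- unreachable: split never returns an empty list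
  | n0 :: nodes => pvPopRevLoop (pvBuildLoop nodes n0 [n0]) []

def get_forefather_roads (road : String) : List (String × Option String) :=
  match pvGetAncestorRoads road.toList with
  | [] => []                      -- unreachable for a String argument
  | popped :: rest =>
      if popped = road.toList then rest.map (fun r => (String.ofList r, (none : Option String)))
      else []                     -- raise ForeFatherException (excluded by Pre_)

-- ===== PORT B =====
def get_forefather_roads_alt (road : String) : List (String × Option String) :=
  let cuts := ((PySem.List.enumerate road.toList 0).filter (fun p => p.2 == ',')).map (fun p => p.1)
  -- dict comprehension: the keys road[:p] have strictly decreasing lengths, hence are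
  -- pairwise distinct, so the insertion-order association list is this map
  cuts.reverse.map (fun p =>
    (String.ofList (PySem.List.slice road.toList none (some p)), (none : Option String)))

-- ===== PRECONDITION & SPEC =====
-- Pre_ excludes exactly the roads starting with the delimiter ',': there A raises
-- ForeFatherException (create_road drops the empty first node, so the rebuilt road
-- fails A's pop-and-compare check); on every other string A returns normally.
def Pre_get_forefather_roads (road : String) : Prop := road.toList.head? ≠ some ','
instance (road : String) : Decidable (Pre_get_forefather_roads road) := by
  unfold Pre_get_forefather_roads; infer_instance
def pvWitness_get_forefather_roads : String := "a,b,c"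

def Spec_get_forefather_roads (road : String) (out : List (String × Option String)) : Prop :=
  out = get_forefather_roads_alt road
instance (road : String) (out : List (String × Option String)) :
    Decidable (Spec_get_forefather_roads road out) := by
  unfold Spec_get_forefather_roads; infer_instance

-- ===== CLAIM (what is proved, stated in full; the proofs are below) =====
def Claim_equal_get_forefather_roads : Prop := ∀ (road : String), Dom_get_forefather_roads road → Pre_get_forefather_roads road → Spec_get_forefather_roads road (get_forefather_roads road)

-- ===== LEMMAS AND PROOFS =====

-- clean structural form of str.split(",")
def pvSplit (cur : List Char) : List Char → List (List Char)
  | [] => [cur]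
  | c :: rest => if c = ',' then cur :: pvSplit [] rest else pvSplit (cur ++ [c]) rest

-- the prefix of the road standing before each delimiter, in ascending length
def pvPref (acc : List Char) : List Char → List (List Char)
  | [] => []
  | c :: rest => if c = ',' then acc :: pvPref (acc ++ [c]) rest else pvPref (acc ++ [c]) rest

theorem pvSplitOn_go_spec (l : List Char) : ∀ (fuel : Nat), l.length < fuel →
    ∀ (cur : List Char) (acc : List (List Char)),
    PySem.Chars.splitOn.go [','] fuel l cur acc = acc.reverse ++ pvSplit cur.reverse l := by
  induction l with
  | nil =>
    rintro (_ | f) h cur acc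
    · omega
    · simp [PySem.Chars.splitOn.go, pvSplit]
  | cons c rest ih =>
    rintro (_ | f) h cur acc
    · omega
    by_cases hc : c = ','
    · subst hc
      rw [show PySem.Chars.splitOn.go [','] (f+1) (',' :: rest) cur acc
            = PySem.Chars.splitOn.go [','] f rest [] (cur.reverse :: acc) by
          simp [PySem.Chars.splitOn.go, List.isPrefixOf]]
      rw [ih f (by simpa using h) [] (cur.reverse :: acc)]
      simp [pvSplit]
    · rw [show PySem.Chars.splitOn.go [','] (f+1) (c :: rest) cur acc
            = PySem.Chars.splitOn.go [','] f rest (c :: cur) acc by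
          simp [PySem.Chars.splitOn.go, List.isPrefixOf, Ne.symm hc]]
      rw [ih f (by simpa using h) (c :: cur) acc]
      simp [pvSplit, hc]

theorem pvSplitOn_eq (s : List Char) : PySem.Chars.splitOn s [','] = pvSplit [] s := by
  rw [PySem.Chars.splitOn, pvSplitOn_go_spec s (s.length + 1) (by omega) [] []]
  simp

theorem pvPopRevLoop_eq (t x : List (List Char)) : pvPopRevLoop t x = x ++ t.reverse := by
  fun_induction pvPopRevLoop t x with
  | case1 x => simp
  | case2 a as x ih =>
    rw [ih]
    conv_rhs => rw [← List.dropLast_append_getLast (l := a :: as) (by simp)]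
    simp

theorem pvBuild_split (s : List Char) : ∀ (d temp : List Char) (acc : List (List Char)),
    temp ≠ [] →
    pvBuildLoop (pvSplit d s) temp acc
      = acc ++ pvPref (temp ++ ',' :: d) s ++ [temp ++ ',' :: d ++ s] := by
  induction s with
  | nil =>
    intro d temp acc htemp
    simp [pvSplit, pvBuildLoop, pvCreateRoad, htemp, pvPref]
  | cons c rest ih =>
    intro d temp acc htemp
    by_cases hc : c = ','
    · subst hc
      rw [show pvSplit d (',' :: rest) = d :: pvSplit [] rest from by simp [pvSplit]]
      simp only [pvBuildLoop]
      rw [show pvCreateRoad temp d = temp ++ ',' :: d from by simp [pvCreateRoad, htemp]]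
      rw [ih [] (temp ++ ',' :: d) (acc ++ [temp ++ ',' :: d]) (by simp)]
      simp [pvPref]
    · rw [show pvSplit d (c :: rest) = pvSplit (d ++ [c]) rest from by simp [pvSplit, hc]]
      rw [ih (d ++ [c]) temp acc htemp]
      simp [pvPref, hc]

theorem pvBuild_first (s : List Char) : ∀ (cur : List Char), cur ≠ [] →
    (match pvSplit cur s with
     | [] => ([] : List (List Char))
     | n0 :: cs => pvBuildLoop cs n0 [n0]) = pvPref cur s ++ [cur ++ s] := by
  induction s with
  | nil => intro cur hcur; simp [pvSplit, pvBuildLoop, pvPref]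
  | cons c rest ih =>
    intro cur hcur
    by_cases hc : c = ','
    · subst hc
      rw [show pvSplit cur (',' :: rest) = cur :: pvSplit [] rest from by simp [pvSplit]]
      simp only []
      show pvBuildLoop (pvSplit [] rest) cur [cur] = _
      rw [pvBuild_split rest [] cur [cur] hcur]
      simp [pvPref]
    · rw [show pvSplit cur (c :: rest) = pvSplit (cur ++ [c]) rest from by simp [pvSplit, hc]]
      rw [ih (cur ++ [c]) (by simp)]
      simp [pvPref, hc]

theorem pvPref_slices (s : List Char) : ∀ (acc : List Char),
    ((PySem.List.enumerate s (acc.length : Int)).filter (fun p => p.2 == ',')).map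
        (fun p => PySem.List.slice (acc ++ s) none (some p.1))
      = pvPref acc s := by
  induction s with
  | nil => intro acc; simp [pvPref]
  | cons c rest ih =>
    intro acc
    rw [PySem.List.enumerate_cons]
    have hcast : ((acc.length : Int) + 1) = (((acc ++ [c]).length : Nat) : Int) := by simp
    have hstr : acc ++ c :: rest = (acc ++ [c]) ++ rest := by simp
    by_cases hc : c = ','
    · subst hc
      rw [show pvPref acc (',' :: rest) = acc :: pvPref (acc ++ [',']) rest from by simp [pvPref]]
      rw [List.filter_cons_of_pos (by simp), List.map_cons]
      rw [show PySem.List.slice (acc ++ ',' :: rest) none (some (acc.length : Int)) = acc from by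
        rw [PySem.List.slice_to_natCast]; exact List.take_left]
      rw [hstr, hcast, ih (acc ++ [','])]
    · rw [show pvPref acc (c :: rest) = pvPref (acc ++ [c]) rest from by simp [pvPref, hc]]
      rw [List.filter_cons_of_neg (by simp [hc]), hstr, hcast, ih (acc ++ [c])]

theorem pvAncestors_eq (road : String) (h : road.toList.head? ≠ some ',') :
    pvGetAncestorRoads road.toList = road.toList :: (pvPref [] road.toList).reverse := by
  unfold pvGetAncestorRoads
  rw [pvSplitOn_eq]
  cases hs : road.toList with
  | nil => simp [pvSplit, pvBuildLoop, pvPopRevLoop_eq, pvPref]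
  | cons c rest =>
    have hc : c ≠ ',' := by rw [hs] at h; simpa using h
    rw [show pvSplit [] (c :: rest) = pvSplit [c] rest from by simp [pvSplit, hc]]
    have hb := pvBuild_first rest [c] (by simp)
    rcases hsp : pvSplit [c] rest with _ | ⟨n0, cs⟩
    · rw [hsp] at hb; simp at hb
    · rw [hsp] at hb
      simp only [] at hb ⊢
      rw [hb, pvPopRevLoop_eq]
      rw [show pvPref [] (c :: rest) = pvPref [c] rest from by simp [pvPref, hc]]
      simp

-- ===== VERDICT (by name: the statement is the Claim_ definition above) =====
theorem get_forefather_roads_spec : Claim_equal_get_forefather_roads := by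
  intro road _ hpre
  unfold Spec_get_forefather_roads get_forefather_roads get_forefather_roads_alt
  rw [pvAncestors_eq road hpre]
  have key : ((PySem.List.enumerate road.toList 0).filter (fun p => p.2 == ',')).map
      (fun p => PySem.List.slice road.toList none (some p.1)) = pvPref [] road.toList := by
    have := pvPref_slices road.toList []
    simpa using this
  rw [← key]
  simp [List.map_reverse, List.map_map, Function.comp]
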